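-- pv_equiv track=rewrite | github.com/emanuelemuzio/information-theory | dictionary_encoding.py | equal_letter_runs
-- ===== SOURCE A (Python) =====
-- def equal_letter_runs(T):
--     runs = []
--     for i in range(len(T) - 1):
--         cont = 1
--         add = False
--         for j in range(i + 1, len(T)):
--             if T[i] == T[j]:
--                 add = True
--                 cont = cont + 1
--             if T[i] != T[j]:
--                 break
--         if add:
--             runs.append(T[i] * cont)
--         i = j + 1
--     return runs
-- ===== SOURCE B (Python) =====
-- def equal_letter_runs(T):
--     # collect maximal runs as (element, length), then emit decreasing pieces
--     groups = []
--     n = len(T)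
--     p = 0
--     while p < n:
--         q = p
--         while q < n and T[q] == T[p]:
--             q += 1
--         groups.append((T[p], q - p))
--         p = q
--     runs = []
--     for el, L in groups:
--         for k in range(L, 1, -1):
--             runs.append(el * k)
--     return runs
-- ===== Notes on version B (the rewrite author's own statement) =====
-- stated objective: faster
-- what changed: A rescans forward from every index with a nested loop; B makes one left-to-right pass collecting maximal runs as (element, length) pairs and then emits element*k for k in range(L, 1, -1) per run.
import Mathlib
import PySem

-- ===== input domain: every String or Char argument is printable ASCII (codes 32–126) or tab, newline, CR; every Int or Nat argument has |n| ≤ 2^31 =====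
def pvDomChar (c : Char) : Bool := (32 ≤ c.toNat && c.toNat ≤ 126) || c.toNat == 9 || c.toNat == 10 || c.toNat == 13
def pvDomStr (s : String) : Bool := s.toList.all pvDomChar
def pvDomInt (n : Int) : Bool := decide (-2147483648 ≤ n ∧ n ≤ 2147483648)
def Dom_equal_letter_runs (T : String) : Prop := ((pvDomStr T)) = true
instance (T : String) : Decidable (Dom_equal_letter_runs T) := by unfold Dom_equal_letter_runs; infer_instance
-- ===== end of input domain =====

-- B replaces A's per-index rescanning (nested loops) with one collect-runs pass plus a per-run emission loop (objective: faster; a timing run measured it).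

-- ===== PORT A =====
-- inner 'for j in range(i+1, len(T))' loop with its break; state (cont, add)
def eqlrInner (s : List Char) (ci : Char) : List Int → Int × Bool → Int × Bool
  | [], st => st
  | j :: rest, (cont, add) =>
    match PySem.List.pyGet? s j with
    | none => (cont, add)  -- unreachable: j is a valid index
    | some cj =>
      if ci = cj then eqlrInner s ci rest (cont + 1, true)
      else (cont, add)

-- outer 'for i in range(len(T) - 1)' loop, accumulating runs
def eqlrOuter (s : List Char) : List Int → List String → List String
  | [], runs => runs
  | i :: rest, runs =>
    match PySem.List.pyGet? s i with
    | none => eqlrOuter s rest runs  -- unreachable: i is a valid index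
    | some ci =>
      let st := eqlrInner s ci (PySem.List.pyRange (i + 1) (s.length : Int) 1) (1, false)
      eqlrOuter s rest (if st.2 then runs ++ [String.ofList (List.replicate st.1.toNat ci)] else runs)

def equal_letter_runs (T : String) : List String :=
  eqlrOuter T.toList (PySem.List.pyRange 0 ((T.toList.length : Int) - 1) 1) []

-- ===== PORT B =====
-- first pass: maximal runs as (element, length) pairs
def eqlrGroups : List Char → List (Char × Int)
  | [] => []
  | c :: rest =>
    (c, 1 + ((rest.takeWhile (· = c)).length : Int)) :: eqlrGroups (rest.dropWhile (· = c))
  termination_by t => t.length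
  decreasing_by
    simp only [List.length_cons]
    exact Nat.lt_succ_of_le (List.length_dropWhile_le _ _)

-- second pass: for each run of length L emit el*k for k in range(L, 1, -1)
def equal_letter_runs_alt (T : String) : List String :=
  (eqlrGroups T.toList).flatMap (fun g =>
    (PySem.List.pyRange g.2 1 (-1)).map (fun k => String.ofList (List.replicate k.toNat g.1)))

-- ===== PRECONDITION & SPEC =====
def Spec_equal_letter_runs (T : String) (out : List String) : Prop := out = equal_letter_runs_alt T
instance (T : String) (out : List String) : Decidable (Spec_equal_letter_runs T out) := by unfold Spec_equal_letter_runs; infer_instance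

-- ===== CLAIM (what is proved, stated in full; the proofs are below) =====
def Claim_equal_equal_letter_runs : Prop := ∀ (T : String), Dom_equal_letter_runs T → Spec_equal_letter_runs T (equal_letter_runs T)

-- ===== LEMMAS AND PROOFS =====

-- A's contribution at each start index, as a structural recursion (proof scaffolding)
def eqlrCfun : List Char → List String
  | [] => []
  | x :: rest =>
    (if 0 < (rest.takeWhile (· = x)).length
       then [String.ofList (List.replicate ((rest.takeWhile (· = x)).length + 1) x)] else [])
      ++ eqlrCfun rest

theorem eqlrOuter_append (s : List Char) (l : List Int) (runs : List String) :
    eqlrOuter s l runs = runs ++ eqlrOuter s l [] := by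
  induction l generalizing runs with
  | nil => simp [eqlrOuter]
  | cons i rest ih =>
    simp only [eqlrOuter]
    cases h : PySem.List.pyGet? s i with
    | none => exact ih runs
    | some ci =>
      simp only []
      split_ifs with hf
      · rw [ih (runs ++ _), ih ([] ++ _)]
        simp
      · rw [ih runs]

-- the inner loop counts the run of matching characters starting at index j
theorem eqlrInner_eq (s : List Char) (c : Char) (j : Nat) (cont : Int) (add : Bool) :
    eqlrInner s c (PySem.List.pyRange (j : Int) (s.length : Int) 1) (cont, add) =
      (cont + ((s.drop j).takeWhile (· = c)).length,
       add || decide (0 < ((s.drop j).takeWhile (· = c)).length)) := by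
  have key : ∀ (k j : Nat) (cont : Int) (add : Bool), s.length - j ≤ k →
      eqlrInner s c (PySem.List.pyRange (j : Int) (s.length : Int) 1) (cont, add) =
      (cont + ((s.drop j).takeWhile (· = c)).length,
       add || decide (0 < ((s.drop j).takeWhile (· = c)).length)) := by
    intro k
    induction k with
    | zero =>
      intro j cont add hk
      rw [PySem.List.pyRange_one_eq_nil (by omega), List.drop_eq_nil_of_le (by omega)]
      simp [eqlrInner]
    | succ k ih =>
      intro j cont add hk
      by_cases hj : j < s.length
      · rw [PySem.List.pyRange_one_cons (by exact_mod_cast hj)]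
        rw [List.drop_eq_getElem_cons hj]
        simp only [eqlrInner, PySem.List.pyGet?_natCast, List.getElem?_eq_getElem hj]
        by_cases hc : c = s[j]
        · rw [if_pos hc]
          have hcast : ((j : Int) + 1) = ((j + 1 : Nat) : Int) := by push_cast; ring
          rw [hcast, ih (j+1) (cont+1) true (by omega)]
          simp only [List.takeWhile_cons, ← hc, decide_true, Bool.true_or]
          refine Prod.ext ?_ ?_
          · push_cast [List.length_cons]; ring
          · simp
        · rw [if_neg hc]
          simp [Ne.symm hc]
      · rw [PySem.List.pyRange_one_eq_nil (by omega), List.drop_eq_nil_of_le (by omega)]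
        simp [eqlrInner]
  exact key s.length j cont add (by omega)

-- the outer loop, started at index pre.length of pre ++ t, yields A's contributions over t
theorem eqlrOuter_char (t pre : List Char) :
    eqlrOuter (pre ++ t)
        (PySem.List.pyRange (pre.length : Int) ((pre.length : Int) + (t.length : Int) - 1) 1) []
      = eqlrCfun t := by
  induction t generalizing pre with
  | nil =>
    rw [PySem.List.pyRange_one_eq_nil (by simp)]
    simp [eqlrOuter, eqlrCfun]
  | cons x rest ih =>
    cases rest with
    | nil =>
      rw [PySem.List.pyRange_one_eq_nil (by simp)]
      simp [eqlrOuter, eqlrCfun]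
    | cons y rest' =>
      rw [PySem.List.pyRange_one_cons (by simp only [List.length_cons]; push_cast; omega)]
      have hget : PySem.List.pyGet? (pre ++ x :: y :: rest') (pre.length : Int) = some x := by
        rw [PySem.List.pyGet?_natCast]
        simp
      have hsplit : pre ++ x :: y :: rest' = (pre ++ [x]) ++ (y :: rest') := by simp
      have hdrop : (pre ++ x :: y :: rest').drop (pre.length + 1) = y :: rest' := by
        rw [hsplit]
        have hl : pre.length + 1 = (pre ++ [x]).length := by simp
        rw [hl, List.drop_left]
      simp only [eqlrOuter, hget]
      have hcast : ((pre.length : Int) + 1) = ((pre.length + 1 : Nat) : Int) := by push_cast; ring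
      rw [hcast, eqlrInner_eq, hdrop]
      set m := ((y :: rest').takeWhile (· = x)).length with hm
      have houter : eqlrOuter (pre ++ x :: y :: rest')
          (PySem.List.pyRange ((pre.length + 1 : Nat) : Int)
            ((pre.length : Int) + ((x :: y :: rest').length : Int) - 1) 1) []
          = eqlrCfun (y :: rest') := by
        rw [hsplit,
          show ((pre.length + 1 : Nat) : Int) = (((pre ++ [x]).length : Nat) : Int) by simp,
          show ((pre.length : Int) + ((x :: y :: rest').length : Int) - 1)
              = (((pre ++ [x]).length : Int) + ((y :: rest').length : Int) - 1) by
            simp only [List.length_cons, List.length_append, List.length_nil]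
            push_cast; ring]
        exact ih (pre ++ [x])
      have htoNat : ((1 : Int) + (m : Int)).toNat = m + 1 := by omega
      rw [eqlrOuter_append]
      simp only [Bool.false_or, htoNat]
      by_cases hm0 : 0 < m
      · rw [if_pos (by simpa using hm0)]
        rw [houter]
        conv_rhs => rw [eqlrCfun]
        rw [← hm, if_pos hm0]
        simp
      · rw [if_neg (by simpa using hm0)]
        rw [houter]
        conv_rhs => rw [eqlrCfun]
        rw [← hm, if_neg hm0]

-- A's per-index contributions equal B's per-run emission
theorem eqlrCfun_eq_groups (t : List Char) :
    eqlrCfun t = (eqlrGroups t).flatMap (fun g =>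
      (PySem.List.pyRange g.2 1 (-1)).map (fun k => String.ofList (List.replicate k.toNat g.1))) := by
  induction t with
  | nil => simp [eqlrCfun, eqlrGroups]
  | cons x rest ih =>
    cases rest with
    | nil =>
      rw [eqlrGroups]
      simp [eqlrCfun, eqlrGroups, PySem.List.pyRange_neg_one_eq_nil (by norm_num : (1:Int) ≤ 1)]
    | cons y rest' =>
      by_cases hy : y = x
      · subst hy
        rw [eqlrCfun, ih, eqlrGroups, eqlrGroups]
        have htw : List.takeWhile (fun c => decide (c = y)) (y :: rest')
            = y :: List.takeWhile (fun c => decide (c = y)) rest' := by simp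
        have hdw : List.dropWhile (fun c => decide (c = y)) (y :: rest')
            = List.dropWhile (fun c => decide (c = y)) rest' := by simp
        rw [htw, hdw]
        simp only [List.length_cons, List.flatMap_cons]
        set n := (List.takeWhile (fun c => decide (c = y)) rest').length with hn
        have hr1 : ((1:Int) + ((n + 1 : Nat) : Int)) = 2 + (n : Int) := by push_cast; ring
        have hr2 : PySem.List.pyRange (2 + (n:Int)) 1 (-1)
            = (2 + (n:Int)) :: PySem.List.pyRange (1 + (n:Int)) 1 (-1) := by
          rw [PySem.List.pyRange_neg_one_cons (by omega),
            show (2 + (n:Int) - 1) = 1 + (n:Int) by ring]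
        have ht2 : ((2:Int) + (n:Int)).toNat = n + 2 := by omega
        rw [hr1, hr2, if_pos (Nat.succ_pos n)]
        simp only [List.map_cons, ht2]
        simp [List.replicate_succ]
      · have htw : List.takeWhile (fun c => decide (c = x)) (y :: rest') = [] := by simp [hy]
        have hdw : List.dropWhile (fun c => decide (c = x)) (y :: rest') = y :: rest' := by simp [hy]
        rw [eqlrCfun, ih]
        conv_rhs => rw [eqlrGroups]
        rw [htw, hdw]
        simp [PySem.List.pyRange_neg_one_eq_nil (by norm_num : (1:Int) ≤ 1)]

-- ===== VERDICT (by name: the statement is the Claim_ definition above) =====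
theorem equal_letter_runs_spec : Claim_equal_equal_letter_runs := by
  intro T _
  unfold Spec_equal_letter_runs equal_letter_runs equal_letter_runs_alt
  have h := eqlrOuter_char T.toList []
  simpa [eqlrCfun_eq_groups] using h
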